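-- pv_equiv track=rewrite | github.com/super30admin/BFS-1 | courseCompletion/courseCompletion_bfsWay.py | indegreesList
-- ===== SOURCE A (Python) =====
-- def indegreesList(prerequisites):
--
--     # Create indegrees
--     indegrees = {}
--
--     # Step 1: fill-up the indegrees
--     for edge in prerequisites:
--
--         # Check for dependents
--         if edge[0] not in indegrees:
--             indegrees[edge[0]] = 1
--         else:
--             indegrees[edge[0]] = indegrees[edge[0]] + 1
--
--         # Check for independents
--         if edge[1] not in indegrees:
--             indegrees[edge[1]] = 0
--
--     return indegrees
-- ===== SOURCE B (Python) =====
-- def indegreesList(prerequisites):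
--     prerequisites = list(prerequisites)
--     # Pass 1: count how often each node appears as a dependent (edge[0]).
--     counts = {}
--     for e in prerequisites:
--         counts[e[0]] = counts.get(e[0], 0) + 1
--     # Pass 2: emit keys in first-appearance order (edge[0] before edge[1] per edge),
--     # each with its final count (0 for nodes never appearing as edge[0]).
--     result = {}
--     for e in prerequisites:
--         if e[0] not in result:
--             result[e[0]] = counts[e[0]]
--         if e[1] not in result:
--             result[e[1]] = counts.get(e[1], 0)
--     return result
-- ===== Notes on version B (the rewrite author's own statement) =====
-- stated objective: alternative
-- what changed: A maintains running counts in one pass by incrementing the dict entry on every edge; B is a two-pass decomposition: it first precomputes the final head-count of every node in a separate counts dict, then a second pass inserts each key once, at its first appearance, already with its final value (never updating an existing entry).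
import Mathlib
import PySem

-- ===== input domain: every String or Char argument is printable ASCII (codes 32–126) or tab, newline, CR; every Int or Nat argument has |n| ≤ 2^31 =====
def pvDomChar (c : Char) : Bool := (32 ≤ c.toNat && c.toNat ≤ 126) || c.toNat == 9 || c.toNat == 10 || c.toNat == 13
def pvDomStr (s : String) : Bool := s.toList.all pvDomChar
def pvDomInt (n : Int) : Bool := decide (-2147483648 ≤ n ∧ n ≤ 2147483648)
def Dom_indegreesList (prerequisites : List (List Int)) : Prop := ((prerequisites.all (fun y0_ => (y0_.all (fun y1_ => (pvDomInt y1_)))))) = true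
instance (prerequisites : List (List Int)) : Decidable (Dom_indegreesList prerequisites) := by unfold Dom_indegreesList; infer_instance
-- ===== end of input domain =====

-- B replaces A's single-pass running-count dict by a two-pass decomposition (precompute
-- final counts, then insert each key once with its final value); same cost, different structure.


-- ===== PORT A =====
-- edge[0] / edge[1]; the default 0 is only reached outside Pre_ (where Python raises IndexError)
def pvHd (e : List Int) : Int := PySem.List.pyGetD e 0 0
def pvTl (e : List Int) : Int := PySem.List.pyGetD e 1 0

def indegreesList (prerequisites : List (List Int)) : List (Int × Int) :=
  (prerequisites.foldl
    (fun indegrees edge =>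
      let indegrees :=
        if indegrees.contains (pvHd edge) = false then indegrees.insert (pvHd edge) 1
        else indegrees.insert (pvHd edge) (indegrees.getD (pvHd edge) 0 + 1)
      if indegrees.contains (pvTl edge) = false then indegrees.insert (pvTl edge) 0
      else indegrees)
    PySem.Dict.empty).items

-- ===== PORT B =====
def indegreesList_alt (prerequisites : List (List Int)) : List (Int × Int) :=
  let counts := prerequisites.foldl
    (fun c e => c.insert (pvHd e) (c.getD (pvHd e) 0 + 1)) PySem.Dict.empty
  (prerequisites.foldl
    (fun result e =>
      let result :=
        if result.contains (pvHd e) = false then result.insert (pvHd e) (counts.getD (pvHd e) 0)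
        else result
      if result.contains (pvTl e) = false then result.insert (pvTl e) (counts.getD (pvTl e) 0)
      else result)
    PySem.Dict.empty).items

-- ===== PRECONDITION & SPEC =====
-- Pre_ excludes exactly the inputs on which Python A raises IndexError (an edge shorter than 2).
def Pre_indegreesList (prerequisites : List (List Int)) : Prop :=
  ∀ e ∈ prerequisites, 2 ≤ e.length
instance (prerequisites : List (List Int)) : Decidable (Pre_indegreesList prerequisites) := by
  unfold Pre_indegreesList; infer_instance
def pvWitness_indegreesList : List (List Int) := [[1, 2], [2, 3], [1, 3]]

def Spec_indegreesList (prerequisites : List (List Int)) (out : List (Int × Int)) : Prop := out = indegreesList_alt prerequisites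
instance (prerequisites : List (List Int)) (out : List (Int × Int)) : Decidable (Spec_indegreesList prerequisites out) := by unfold Spec_indegreesList; infer_instance

-- ===== CLAIM (what is proved, stated in full; the proofs are below) =====
def Claim_equal_indegreesList : Prop := ∀ (prerequisites : List (List Int)), Dom_indegreesList prerequisites → Pre_indegreesList prerequisites → Spec_indegreesList prerequisites (indegreesList prerequisites)

-- ===== LEMMAS AND PROOFS =====

-- named loop bodies (definitionally the lambdas of the two ports)
def pvStepA (d : PySem.Dict Int Int) (edge : List Int) : PySem.Dict Int Int :=
  let d :=
    if d.contains (pvHd edge) = false then d.insert (pvHd edge) 1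
    else d.insert (pvHd edge) (d.getD (pvHd edge) 0 + 1)
  if d.contains (pvTl edge) = false then d.insert (pvTl edge) 0 else d

def pvStepB (c : PySem.Dict Int Int) (r : PySem.Dict Int Int) (e : List Int) :
    PySem.Dict Int Int :=
  let r :=
    if r.contains (pvHd e) = false then r.insert (pvHd e) (c.getD (pvHd e) 0) else r
  if r.contains (pvTl e) = false then r.insert (pvTl e) (c.getD (pvTl e) 0) else r

-- number of occurrences of k as a head (edge[0]) in l
def pvCnt (l : List (List Int)) (k : Int) : Int := ((l.map pvHd).count k : Int)

theorem pvCnt_nil (k : Int) : pvCnt [] k = 0 := rfl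

theorem pvCnt_cons (e : List Int) (l : List (List Int)) (k : Int) :
    pvCnt (e :: l) k = (if pvHd e = k then 1 else 0) + pvCnt l k := by
  by_cases h : pvHd e = k
  · simp [pvCnt, h]
    omega
  · simp [pvCnt, h]

-- facts about a dict represented as ks.map (fun k => (k, g k))
theorem pv_rep_keys (d : PySem.Dict Int Int) (ks : List Int) (g : Int → Int)
    (h : d.items = ks.map (fun k => (k, g k))) : d.keys = ks := by
  simp [PySem.Dict.keys, h, List.map_map, Function.comp_def]

theorem pv_rep_contains (d : PySem.Dict Int Int) (ks : List Int) (g : Int → Int)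
    (h : d.items = ks.map (fun k => (k, g k))) (k : Int) :
    d.contains k = decide (k ∈ ks) := by
  rw [PySem.Dict.contains_eq_decide_mem_keys, pv_rep_keys d ks g h]

theorem pv_rep_getD (d : PySem.Dict Int Int) (ks : List Int) (g : Int → Int)
    (h : d.items = ks.map (fun k => (k, g k))) (hnd : ks.Nodup) {k : Int} (hk : k ∈ ks) :
    d.getD k 0 = g k := by
  apply PySem.Dict.getD_of_mem_items
  · rw [h]; exact List.mem_map.2 ⟨k, hk, rfl⟩
  · rw [pv_rep_keys d ks g h]; exact hnd

theorem pv_rep_insert_mem (d : PySem.Dict Int Int) (ks : List Int) (g : Int → Int)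
    (h : d.items = ks.map (fun k => (k, g k))) {k : Int} (hk : k ∈ ks) (v : Int) :
    (d.insert k v).items = ks.map (fun j => (j, if j = k then v else g j)) := by
  rw [PySem.Dict.items_insert_of_contains d v
    (by rw [pv_rep_contains d ks g h]; exact decide_eq_true hk)]
  rw [h, List.map_map]
  apply List.map_congr_left
  intro j _
  by_cases hj : j = k <;> simp [hj]

theorem pv_rep_insert_new (d : PySem.Dict Int Int) (ks : List Int) (g : Int → Int)
    (h : d.items = ks.map (fun k => (k, g k))) {k : Int} (hk : k ∉ ks) (v : Int) :
    (d.insert k v).items = (ks ++ [k]).map (fun j => (j, if j = k then v else g j)) := by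
  rw [PySem.Dict.items_insert_of_not_contains d v
    (by rw [pv_rep_contains d ks g h]; exact decide_eq_false hk)]
  rw [h, List.map_append]
  congr 1
  · apply List.map_congr_left
    intro j hj
    have hne : j ≠ k := fun hjk => hk (hjk ▸ hj)
    simp [hne]
  · simp

-- A's increment-or-insert-1 phase on a represented dict
theorem pv_bump_rep (d : PySem.Dict Int Int) (ks : List Int) (g : Int → Int)
    (h : d.items = ks.map (fun k => (k, g k))) (hnd : ks.Nodup) (x : Int) :
    (if d.contains x = false then d.insert x 1 else d.insert x (d.getD x 0 + 1)).items =
      (PySem.Set.add ks x).map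
        (fun j => (j, if j = x then (if x ∈ ks then g j + 1 else 1) else g j)) := by
  by_cases hmem : x ∈ ks
  · rw [pv_rep_contains d ks g h, decide_eq_true hmem]
    rw [if_neg (by simp)]
    rw [pv_rep_getD d ks g h hnd hmem, pv_rep_insert_mem d ks g h hmem]
    have hadd : PySem.Set.add ks x = ks := by simp [PySem.Set.add, hmem]
    rw [hadd]
    apply List.map_congr_left
    intro j _
    by_cases hj : j = x <;> simp [hj, hmem]
  · rw [pv_rep_contains d ks g h, decide_eq_false hmem]
    rw [if_pos (by simp)]
    rw [pv_rep_insert_new d ks g h hmem]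
    have hadd : PySem.Set.add ks x = ks ++ [x] := by simp [PySem.Set.add, hmem]
    rw [hadd]
    apply List.map_congr_left
    intro j _
    by_cases hj : j = x <;> simp [hj, hmem]

-- the insert-if-absent phase (A's tail zero-fill, B's both inserts) on a represented dict
theorem pv_setd_rep (d : PySem.Dict Int Int) (ks : List Int) (g : Int → Int)
    (h : d.items = ks.map (fun k => (k, g k))) (x v : Int) :
    (if d.contains x = false then d.insert x v else d).items =
      (PySem.Set.add ks x).map (fun j => (j, if j ∈ ks then g j else v)) := by
  by_cases hmem : x ∈ ks
  · rw [pv_rep_contains d ks g h, decide_eq_true hmem]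
    rw [if_neg (by simp)]
    have hadd : PySem.Set.add ks x = ks := by simp [PySem.Set.add, hmem]
    rw [hadd, h]
    apply List.map_congr_left
    intro j hj
    simp [hj]
  · rw [pv_rep_contains d ks g h, decide_eq_false hmem]
    rw [if_pos (by simp)]
    rw [pv_rep_insert_new d ks g h hmem]
    have hadd : PySem.Set.add ks x = ks ++ [x] := by simp [PySem.Set.add, hmem]
    rw [hadd]
    apply List.map_congr_left
    intro j hj
    rcases List.mem_append.1 hj with hjk | hjx
    · have hne : j ≠ x := fun hjk' => hmem (hjk' ▸ hjk)
      simp [hne, hjk]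
    · have hjx' : j = x := by simpa using hjx
      simp [hjx', hmem]

theorem pv_stepA_rep (d : PySem.Dict Int Int) (ks : List Int) (g : Int → Int)
    (h : d.items = ks.map (fun k => (k, g k))) (hnd : ks.Nodup) (e : List Int) :
    (pvStepA d e).items =
      (PySem.Set.add (PySem.Set.add ks (pvHd e)) (pvTl e)).map
        (fun j => (j,
          if j ∈ PySem.Set.add ks (pvHd e) then
            (if j = pvHd e then (if pvHd e ∈ ks then g j + 1 else 1) else g j)
          else 0)) :=
  pv_setd_rep _ (PySem.Set.add ks (pvHd e)) _ (pv_bump_rep d ks g h hnd (pvHd e)) (pvTl e) 0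

theorem pv_stepB_rep (c : PySem.Dict Int Int) (r : PySem.Dict Int Int) (ks : List Int)
    (g : Int → Int) (h : r.items = ks.map (fun k => (k, g k))) (e : List Int) :
    (pvStepB c r e).items =
      (PySem.Set.add (PySem.Set.add ks (pvHd e)) (pvTl e)).map
        (fun j => (j,
          if j ∈ PySem.Set.add ks (pvHd e) then
            (if j ∈ ks then g j else c.getD (pvHd e) 0)
          else c.getD (pvTl e) 0)) :=
  pv_setd_rep _ (PySem.Set.add ks (pvHd e)) _
    (pv_setd_rep r ks g h (pvHd e) (c.getD (pvHd e) 0)) (pvTl e) (c.getD (pvTl e) 0)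

-- the simulation: A's running dict and B's final-count dict stay in lockstep
theorem pv_sim (c : PySem.Dict Int Int) :
    ∀ (l : List (List Int)) (ks : List Int) (g : Int → Int)
      (dA rB : PySem.Dict Int Int),
      ks.Nodup →
      dA.items = ks.map (fun k => (k, g k)) →
      rB.items = ks.map (fun k => (k, g k + pvCnt l k)) →
      (∀ k, k ∉ ks → c.getD k 0 = pvCnt l k) →
      (l.foldl pvStepA dA).items = (l.foldl (pvStepB c) rB).items := by
  intro l
  induction l with
  | nil =>
    intro ks g dA rB hnd hA hB hc
    simp only [List.foldl_nil]
    rw [hA, hB]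
    apply List.map_congr_left
    intro k _
    simp [pvCnt_nil]
  | cons e es ih =>
    intro ks g dA rB hnd hA hB hc
    simp only [List.foldl_cons]
    apply ih (PySem.Set.add (PySem.Set.add ks (pvHd e)) (pvTl e))
      (fun j =>
        if j ∈ PySem.Set.add ks (pvHd e) then
          (if j = pvHd e then (if pvHd e ∈ ks then g j + 1 else 1) else g j)
        else 0)
    · exact PySem.Set.nodup_add _ _ (PySem.Set.nodup_add _ _ hnd)
    · exact pv_stepA_rep dA ks g hA hnd e
    · rw [pv_stepB_rep c rB ks (fun k => g k + pvCnt (e :: es) k) hB e]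
      apply List.map_congr_left
      intro j hj
      apply congrArg (Prod.mk j)
      by_cases hks : j ∈ ks
      · have h1 : j ∈ PySem.Set.add ks (pvHd e) := (PySem.Set.mem_add _ _ _).2 (Or.inl hks)
        rw [if_pos h1, if_pos hks, if_pos h1]
        by_cases hjh : j = pvHd e
        · rw [if_pos hjh, if_pos (hjh ▸ hks), pvCnt_cons, if_pos hjh.symm]
          ring
        · rw [if_neg hjh, pvCnt_cons, if_neg (fun hh => hjh hh.symm)]
          ring
      · by_cases hjh : j = pvHd e
        · have hh' : pvHd e ∉ ks := hjh ▸ hks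
          have h1 : j ∈ PySem.Set.add ks (pvHd e) := (PySem.Set.mem_add _ _ _).2 (Or.inr hjh)
          rw [if_pos h1, if_neg hks, if_pos h1, if_pos hjh, if_neg hh', hc (pvHd e) hh',
            pvCnt_cons, if_pos rfl, hjh]
        · have h1 : j ∉ PySem.Set.add ks (pvHd e) := by
            rw [PySem.Set.mem_add]
            rintro (h' | h') <;> [exact hks h'; exact hjh h']
          have hjt : j = pvTl e := by
            rcases (PySem.Set.mem_add _ _ _).1 hj with h' | h'
            · exact absurd h' h1
            · exact h'
          rw [if_neg h1, if_neg h1, ← hjt, hc j hks, pvCnt_cons,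
            if_neg (fun hh => hjh hh.symm)]
    · intro k hk
      have hks : k ∉ ks := fun h' => hk ((PySem.Set.mem_add _ _ _).2 (Or.inl ((PySem.Set.mem_add _ _ _).2 (Or.inl h'))))
      have hkh : ¬ pvHd e = k := by
        intro h'
        exact hk ((PySem.Set.mem_add _ _ _).2 (Or.inl ((PySem.Set.mem_add _ _ _).2 (Or.inr h'.symm))))
      rw [hc k hks, pvCnt_cons, if_neg hkh]
      ring

-- B's first pass computes exactly the head counts
theorem pv_counts_getD (pre : List (List Int)) (k : Int) :
    (pre.foldl (fun c e => c.insert (pvHd e) (c.getD (pvHd e) 0 + 1))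
      PySem.Dict.empty).getD k 0 = pvCnt pre k := by
  rw [← List.foldl_map (f := pvHd)
    (g := fun (d : PySem.Dict Int Int) x => d.insert x (d.getD x 0 + 1))]
  rw [PySem.Dict.getD_foldl_insert_add_one]
  simp [pvCnt]

-- ===== VERDICT (by name: the statement is the Claim_ definition above) =====
theorem indegreesList_spec : Claim_equal_indegreesList := by
  intro pre _ _
  unfold Spec_indegreesList indegreesList indegreesList_alt
  apply pv_sim _ pre [] (fun _ => 0) PySem.Dict.empty PySem.Dict.empty List.nodup_nil rfl rfl
  intro k _
  rw [pv_counts_getD]
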